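-- pv_equiv track=rewrite | github.com/RATNAKARMISHR/ProblemSolving | minimumOperation.py | minimumOperation
-- ===== SOURCE A (Python) =====
-- def minimumOperation(n):
--     count=0
--     while(n):
--         if n%2==0:
--             n=n//2
--         else:
--             n-=1
--         count+=1
--     return count
-- ===== SOURCE B (Python) =====
-- def minimumOperation(n):
--     # Closed form: halvings = bit_length - 1, decrements = popcount (one per set bit).
--     if n == 0:
--         return 0
--     return n.bit_length() - 1 + bin(n).count('1')
-- ===== Notes on version B (the rewrite author's own statement) =====
-- stated objective: simpler
-- what changed: Replaced the halve/decrement simulation loop with a loop-free closed form: bit_length-1 halvings plus popcount (count of set bits) decrements.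
import Mathlib
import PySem

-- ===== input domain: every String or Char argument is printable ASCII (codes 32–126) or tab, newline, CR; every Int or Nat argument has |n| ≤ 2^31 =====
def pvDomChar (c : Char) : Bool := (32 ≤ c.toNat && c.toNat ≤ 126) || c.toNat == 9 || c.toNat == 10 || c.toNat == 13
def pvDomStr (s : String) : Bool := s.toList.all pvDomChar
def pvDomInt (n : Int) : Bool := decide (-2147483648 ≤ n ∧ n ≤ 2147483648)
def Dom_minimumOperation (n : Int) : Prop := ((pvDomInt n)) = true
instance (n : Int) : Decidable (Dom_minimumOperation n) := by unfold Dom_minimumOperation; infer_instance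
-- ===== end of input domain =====

-- B replaces A's halve/decrement loop with a closed form read off n's binary
-- representation (bit_length - 1 halvings + popcount decrements); equivalence is
-- claimed on 0 ≤ n, since A's while-loop never terminates for negative n.

-- ===== PORT A =====
-- A's while loop; the `n ≤ 0` guard only makes the function total where the
-- Python loop diverges (n < 0): for n = 0 Python also returns count here.
def minimumOperationLoop (n count : Int) : Int :=
  if h : n ≤ 0 then count
  else if PySem.Int.mod n 2 = 0 then
    minimumOperationLoop (PySem.Int.floordiv n 2) (count + 1)
  else
    minimumOperationLoop (n - 1) (count + 1)
termination_by n.toNat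
decreasing_by
  · have h2 : PySem.Int.floordiv n 2 = n / 2 :=
      PySem.Int.floordiv_eq_ediv_of_pos (by omega)
    rw [h2]; omega
  · omega

def minimumOperation (n : Int) : Int :=
  minimumOperationLoop n 0

-- ===== PORT B =====
def minimumOperation_alt (n : Int) : Int :=
  if n = 0 then 0
  else (PySem.Int.bitLength n : Int) - 1 + (PySem.Int.bitCount n : Int)

-- ===== PRECONDITION & SPEC =====
-- Pre_ excludes n < 0: there A's `while(n)` loop never terminates (no value is returned).
def Pre_minimumOperation (n : Int) : Prop := 0 ≤ n
instance (n : Int) : Decidable (Pre_minimumOperation n) := by unfold Pre_minimumOperation; infer_instance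
def pvWitness_minimumOperation : Int := 6

def Spec_minimumOperation (n : Int) (out : Int) : Prop := out = minimumOperation_alt n
instance (n : Int) (out : Int) : Decidable (Spec_minimumOperation n out) := by unfold Spec_minimumOperation; infer_instance

-- ===== CLAIM (what is proved, stated in full; the proofs are below) =====
def Claim_equal_minimumOperation : Prop := ∀ (n : Int), Dom_minimumOperation n → Pre_minimumOperation n → Spec_minimumOperation n (minimumOperation n)

-- ===== LEMMAS AND PROOFS =====

lemma minimumOperationLoop_closed : ∀ (m : Nat) (n c : Int), n.toNat = m → 0 < n →
    minimumOperationLoop n c = c + (PySem.Int.bitLength n : Int) - 1 + (PySem.Int.bitCount n : Int) := by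
  intro m
  induction m using Nat.strong_induction_on with
  | _ m ih =>
    intro n c hm hn
    rw [minimumOperationLoop]
    rw [dif_neg (by omega)]
    have hdiv : PySem.Int.floordiv n 2 = n / 2 :=
      PySem.Int.floordiv_eq_ediv_of_pos (by omega)
    have hmod : PySem.Int.mod n 2 = n % 2 :=
      PySem.Int.mod_eq_emod_of_pos (by omega)
    by_cases he : PySem.Int.mod n 2 = 0
    · -- n even, hence n ≥ 2 and n / 2 > 0
      rw [if_pos he]
      have he' : n % 2 = 0 := by rw [← hmod]; exact he
      have hn2 : 0 < n / 2 := by omega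
      have hlt : (n / 2).toNat < m := by omega
      rw [hdiv, ih _ hlt (n / 2) (c + 1) rfl hn2]
      have hbl := PySem.Int.bitLength_of_pos hn
      have hbc := PySem.Int.bitCount_of_pos hn
      rw [hdiv] at hbl hbc
      rw [hbl, hbc, hmod, he']
      push_cast
      omega
    · -- n odd
      rw [if_neg he]
      have he' : n % 2 = 1 := by rw [hmod] at he; omega
      by_cases h1 : n = 1
      · subst h1
        rw [minimumOperationLoop]
        rw [dif_pos (by omega),
            show PySem.Int.bitLength (1:Int) = 1 from rfl,
            show PySem.Int.bitCount (1:Int) = 1 from rfl]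
        push_cast; ring
      · -- n odd, n ≥ 3: recurse on n - 1 (even, positive)
        have hn1 : 0 < n - 1 := by omega
        have hlt : (n - 1).toNat < m := by omega
        rw [ih _ hlt (n - 1) (c + 1) rfl hn1]
        -- bitLength n = bitLength (n-1), bitCount n = bitCount (n-1) + 1, via the halving lemmas
        have hbl := PySem.Int.bitLength_of_pos hn
        have hbc := PySem.Int.bitCount_of_pos hn
        have hbl' := PySem.Int.bitLength_of_pos hn1
        have hbc' := PySem.Int.bitCount_of_pos hn1
        have hd1 : PySem.Int.floordiv (n - 1) 2 = (n - 1) / 2 :=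
          PySem.Int.floordiv_eq_ediv_of_pos (by omega)
        have hm1 : PySem.Int.mod (n - 1) 2 = (n - 1) % 2 :=
          PySem.Int.mod_eq_emod_of_pos (by omega)
        have heq : n / 2 = (n - 1) / 2 := by omega
        rw [hdiv, heq] at hbl hbc
        rw [hd1] at hbl' hbc'
        rw [hbl, hbc, hbl', hbc', hmod, hm1, he']
        have : (n - 1) % 2 = 0 := by omega
        rw [this]
        push_cast
        omega

-- ===== VERDICT (by name: the statement is the Claim_ definition above) =====
theorem minimumOperation_spec : Claim_equal_minimumOperation := by
  intro n _ hpre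
  unfold Spec_minimumOperation minimumOperation minimumOperation_alt
  by_cases h0 : n = 0
  · subst h0
    rw [minimumOperationLoop]
    simp
  · have hn : 0 < n := lt_of_le_of_ne hpre (Ne.symm h0)
    rw [minimumOperationLoop_closed n.toNat n 0 rfl hn]
    rw [if_neg h0]
    ring
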